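-- pv_equiv track=rewrite | github.com/jano31415/codejam | codeforces/788_round_div2/proba.py | solve
-- ===== SOURCE A (Python) =====
-- def solve(n,arr):
--     count_neg = 0
--     for x in arr:
--         if x < 0:
--             count_neg += 1
--     last = arr[0]
--     if count_neg >= 1:
--         last = - abs(last)
--     for i, x in enumerate(arr[1:], 1):
--         if i < count_neg:
--             x = -abs(x)
--         else:
--             x = abs(x)
--         if x < last:
--             return "NO"
--         last = x
--     return "YES"
-- ===== SOURCE B (Python) =====
-- def solve(n, arr):
--     c = sum(1 for x in arr if x < 0)
--     mag = [abs(x) for x in arr]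
--     left, right = mag[:c], mag[c:]
--     for a, b in zip(left, left[1:]):
--         if a < b:
--             return "NO"
--     for a, b in zip(right, right[1:]):
--         if a > b:
--             return "NO"
--     return "YES"
-- ===== Notes on version B (the rewrite author's own statement) =====
-- stated objective: alternative
-- what changed: Instead of building the sign-flipped value at each index and checking it against the previous one, B counts negatives once and checks monotonicity of absolute values in two separate segments (non-increasing before the count, non-decreasing after), skipping the always-valid boundary pair.
-- crash fix: A raises IndexError on the empty list (arr[0]); B returns "YES" there, the natural answer for an empty array. — e.g. on solve(0, []): A raises IndexError, B returns "YES"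
import Mathlib
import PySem

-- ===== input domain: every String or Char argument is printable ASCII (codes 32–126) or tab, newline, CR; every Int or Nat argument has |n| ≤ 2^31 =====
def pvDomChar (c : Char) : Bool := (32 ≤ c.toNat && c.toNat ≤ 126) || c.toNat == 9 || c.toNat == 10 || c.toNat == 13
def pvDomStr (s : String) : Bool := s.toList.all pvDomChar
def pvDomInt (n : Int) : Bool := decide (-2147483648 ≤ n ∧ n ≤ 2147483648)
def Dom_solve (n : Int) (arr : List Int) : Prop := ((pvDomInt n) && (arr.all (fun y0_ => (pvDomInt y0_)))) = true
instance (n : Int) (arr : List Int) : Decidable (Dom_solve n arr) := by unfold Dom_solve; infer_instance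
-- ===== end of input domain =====

-- B checks monotonicity of absolute values in two segments (split at the negative count)
-- instead of A's single pass over sign-flipped values; same O(n) cost, different decomposition.
-- A raises IndexError on the empty list; B returns "YES" there (see Raises_solve).

-- ===== PORT A =====
-- A's main loop: index i, previous transformed value `last`, remaining elements.
def solveLoopA (c : Int) : Int → Int → List Int → String
  | _, _, [] => "YES"
  | i, last, x :: xs =>
    let x' : Int := if i < c then -|x| else |x|
    if x' < last then "NO" else solveLoopA c (i + 1) x' xs

def solve (n : Int) (arr : List Int) : String :=
  let countNeg : Int := arr.foldl (fun acc x => if x < 0 then acc + 1 else acc) 0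
  match arr with
  | [] => ""  -- Python raises IndexError at arr[0]; excluded by Pre_solve
  | a :: rest =>
    let last : Int := if countNeg ≥ 1 then -|a| else a
    solveLoopA countNeg 1 last rest

-- ===== PORT B =====
-- 'for a, b in zip(l, l[1:]): if a < b: return "NO"' — adjacent-pair non-increasing check.
def descOk : List Int → Bool
  | a :: b :: r => if a < b then false else descOk (b :: r)
  | _ => true

-- 'for a, b in zip(l, l[1:]): if a > b: return "NO"' — adjacent-pair non-decreasing check.
def ascOk : List Int → Bool
  | a :: b :: r => if a > b then false else ascOk (b :: r)
  | _ => true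

def solve_alt (n : Int) (arr : List Int) : String :=
  let c : Int := ((arr.filter (fun x => x < 0)).length : Int)
  let mag : List Int := arr.map (fun x => |x|)
  let left := PySem.List.slice mag none (some c)
  let right := PySem.List.slice mag (some c) none
  if descOk left then (if ascOk right then "YES" else "NO") else "NO"

-- ===== PRECONDITION & SPEC =====
-- Pre_ excludes only the empty list, on which A raises IndexError at arr[0].
def Pre_solve (n : Int) (arr : List Int) : Prop := arr ≠ []
instance (n : Int) (arr : List Int) : Decidable (Pre_solve n arr) := by unfold Pre_solve; infer_instance
def pvWitness_solve : Int × List Int := (3, [-2, 1, 3])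

-- A raises IndexError on the empty list; B returns "YES", the natural answer for an empty array.
def Raises_solve (n : Int) (arr : List Int) : Prop := arr = []
instance (n : Int) (arr : List Int) : Decidable (Raises_solve n arr) := by unfold Raises_solve; infer_instance
def pvRaiseWitness_solve : Int × List Int := (0, [])
def pvRaiseWitnessOut_solve : String := "YES"

def Spec_solve (n : Int) (arr : List Int) (out : String) : Prop := out = solve_alt n arr
instance (n : Int) (arr : List Int) (out : String) : Decidable (Spec_solve n arr out) := by unfold Spec_solve; infer_instance

-- ===== CLAIM (what is proved, stated in full; the proofs are below) =====
def Claim_equal_solve : Prop := ∀ (n : Int) (arr : List Int), Dom_solve n arr → Pre_solve n arr → Spec_solve n arr (solve n arr)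
def Claim_raises_solve : Prop := (∀ (n : Int) (arr : List Int), Dom_solve n arr → Raises_solve n arr → ¬ Pre_solve n arr) ∧ (Dom_solve (pvRaiseWitness_solve.1) (pvRaiseWitness_solve.2) ∧ Raises_solve (pvRaiseWitness_solve.1) (pvRaiseWitness_solve.2) ∧ solve_alt (pvRaiseWitness_solve.1) (pvRaiseWitness_solve.2) = pvRaiseWitnessOut_solve)

-- ===== LEMMAS AND PROOFS =====

-- Nat-indexed version of A's loop: d = how many more elements get negated.
def solveLoopA' : Nat → Int → List Int → String
  | _, _, [] => "YES"
  | 0, last, x :: xs => if (|x| : Int) < last then "NO" else solveLoopA' 0 |x| xs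
  | d + 1, last, x :: xs => if (-|x| : Int) < last then "NO" else solveLoopA' d (-|x|) xs

lemma solveLoopA_eq (c : Int) : ∀ (l : List Int) (i last : Int),
    solveLoopA c i last l = solveLoopA' (c - i).toNat last l := by
  intro l
  induction l with
  | nil => intro i last; rfl
  | cons x xs ih =>
    intro i last
    by_cases h : i < c
    · have hd : (c - i).toNat = (c - (i + 1)).toNat + 1 := by omega
      simp only [solveLoopA, hd, solveLoopA', if_pos h]
      split <;> simp [ih]
    · have hd : (c - i).toNat = 0 := by omega
      have hd' : (c - (i + 1)).toNat = 0 := by omega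
      simp only [solveLoopA, hd, solveLoopA', if_neg h]
      split <;> simp [ih, hd']

lemma countNeg_eq (arr : List Int) :
    arr.foldl (fun acc x => if x < 0 then acc + 1 else acc) (0 : Int)
      = ((arr.filter (fun x => x < 0)).length : Int) := by
  suffices h : ∀ (a : Int), arr.foldl (fun acc x => if x < 0 then acc + 1 else acc) a
      = a + ((arr.filter (fun x => x < 0)).length : Int) by
    simpa using h 0
  induction arr with
  | nil => intro a; simp
  | cons x xs ih =>
    intro a
    by_cases h : x < 0 <;> simp [List.foldl, h, ih] <;> push_cast <;> ring

-- d = 0: the rest of A's loop is B's ascending check seeded with `last`.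
lemma loopA'_zero : ∀ (l : List Int) (last : Int),
    solveLoopA' 0 last l = if ascOk (last :: l.map (fun x => |x|)) then "YES" else "NO" := by
  intro l
  induction l with
  | nil => intro last; simp [solveLoopA', ascOk]
  | cons x xs ih =>
    intro last
    by_cases h : (|x| : Int) < last
    · simp [solveLoopA', List.map, ascOk, h, show last > |x| from h]
    · simp only [solveLoopA', List.map, ascOk, if_neg h]
      have : ¬ last > |x| := h
      simp [this, ih]

-- ascOk ignores a leading element that is ≤ the next one.
lemma ascOk_cons_of_le (a : Int) (l : List Int) (h : ∀ b ∈ l.head?, a ≤ b) :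
    ascOk (a :: l) = ascOk l := by
  cases l with
  | nil => rfl
  | cons b r =>
    have : ¬ a > b := by have := h b rfl; omega
    simp [ascOk, this]

-- Main bridge: A's loop with d pending negations equals B's two segment checks.
lemma loopA'_eq_segments : ∀ (d : Nat) (l : List Int) (m : Int), 0 ≤ m →
    solveLoopA' d (-m) l =
      if descOk (m :: (l.map (fun x => |x|)).take d) then
        (if ascOk ((l.map (fun x => |x|)).drop d) then "YES" else "NO")
      else "NO" := by
  intro d
  induction d with
  | zero =>
    intro l m hm
    rw [loopA'_zero]
    have h : ascOk (-m :: l.map (fun x => |x|)) = ascOk (l.map (fun x => |x|)) := by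
      apply ascOk_cons_of_le
      intro b hb
      cases l with
      | nil => simp at hb
      | cons x xs =>
        simp at hb
        subst hb
        have := abs_nonneg x
        omega
    simp [descOk, h]
  | succ d ih =>
    intro l m hm
    cases l with
    | nil => simp [solveLoopA', descOk, ascOk]
    | cons x xs =>
      by_cases h : (-|x| : Int) < -m
      · have : m < |x| := by omega
        simp [solveLoopA', h, List.map, descOk, this]
      · have hle : ¬ m < |x| := by omega
        simp only [solveLoopA', if_neg h, List.map, List.take, List.drop, descOk, if_neg hle]
        exact ih xs |x| (abs_nonneg x)

-- ===== VERDICT (by name: the statement is the Claim_ definition above) =====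
theorem solve_spec : Claim_equal_solve := by
  intro n arr _ hpre
  unfold Spec_solve
  cases arr with
  | nil => exact absurd rfl hpre
  | cons a rest =>
    simp only [solve, solve_alt, countNeg_eq]
    set c : Int := (((a :: rest).filter (fun x => x < 0)).length : Int) with hc
    have hc0 : 0 ≤ c := by positivity
    rw [PySem.List.slice_to _ hc0, PySem.List.slice_from _ hc0, solveLoopA_eq]
    by_cases hge : c ≥ 1
    · -- c ≥ 1: the first segment of B is |a| followed by the first c-1 magnitudes of rest
      have hct : c.toNat = (c - 1).toNat + 1 := by omega
      rw [if_pos hge,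
        show ((a :: rest).map (fun x => |x|)) = |a| :: rest.map (fun x => |x|) from rfl, hct]
      simp only [List.take_succ_cons, List.drop_succ_cons]
      exact loopA'_eq_segments (c - 1).toNat rest |a| (abs_nonneg a)
    · -- c = 0: a is not negative, so a = |a| and the whole array is the ascending segment
      have hc0' : c = 0 := by omega
      have ha : ¬ a < 0 := by
        intro ha
        have hmem : a ∈ (a :: rest).filter (fun x => x < 0) := by simp [List.filter, ha]
        have hlen : 0 < ((a :: rest).filter (fun x => x < 0)).length :=
          List.length_pos_of_mem hmem
        omega
      have haa : a = |a| := (abs_of_nonneg (by omega)).symm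
      rw [if_neg hge, hc0', show ((0:Int) - 1).toNat = 0 from rfl, loopA'_zero]
      simp only [Int.toNat_zero, List.take_zero, List.drop_zero, descOk,
        show ((a :: rest).map (fun x => |x|)) = |a| :: rest.map (fun x => |x|) from rfl]
      rw [← haa]
      simp

theorem solve_raises : Claim_raises_solve := by
  unfold Claim_raises_solve
  exact ⟨fun n arr _ h hp => hp h, by decide⟩

-- self-check: the raise-witness value stated in Claim_raises_solve, extracted for direct reading
theorem solve_raises_witness :
    solve_alt pvRaiseWitness_solve.1 pvRaiseWitness_solve.2 = pvRaiseWitnessOut_solve := by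
  have h := solve_raises
  unfold Claim_raises_solve at h
  exact h.2.2.2
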